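-- pv_equiv track=rewrite | github.com/eamon047/EamonCodingLearning | Python/ReinforcementLearning/run_q.py | parse_ascii
-- ===== SOURCE A (Python) =====
-- def parse_ascii(ascii_maze):
--     """
--     Parse ASCII representation of maze into grid, start, and goal.
--     # = wall, . = free, S = start, G = goal
--     """
--     grid = []
--     start = goal = None
--     for i, row in enumerate(ascii_maze):
--         grid_row = []
--         for j, ch in enumerate(row):
--             if ch == '#':
--                 grid_row.append(1)
--             elif ch == '.' or ch.upper() in ('S', 'G'):
--                 grid_row.append(0)
--                 if ch.upper() == 'S':
--                     start = (i, j)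
--                 elif ch.upper() == 'G':
--                     goal = (i, j)
--             else:
--                 raise ValueError(f"只能用 # . S G : 发现 {ch}")
--         grid.append(grid_row)
--     return grid, start, goal
-- ===== SOURCE B (Python) =====
-- def _cell(ch):
--     if ch == '#':
--         return 1
--     if ch == '.' or ch.upper() in ('S', 'G'):
--         return 0
--     raise ValueError(f"只能用 # . S G : 发现 {ch}")
--
--
-- def _last_pos(ascii_maze, target):
--     for i in range(len(ascii_maze) - 1, -1, -1):
--         row = ascii_maze[i]
--         for j in range(len(row) - 1, -1, -1):
--             if row[j].upper() == target:
--                 return (i, j)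
--     return None
--
--
-- def parse_ascii(ascii_maze):
--     grid = [[_cell(ch) for ch in row] for row in ascii_maze]
--     return grid, _last_pos(ascii_maze, 'S'), _last_pos(ascii_maze, 'G')
-- ===== Notes on version B (the rewrite author's own statement) =====
-- stated objective: alternative
-- what changed: A builds the grid and tracks start/goal inside one nested forward loop with overwrite semantics; B builds the grid by a per-character map and finds start/goal by two separate reversed scans that return the first hit from the end (= A's last-occurrence-wins).
import Mathlib
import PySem

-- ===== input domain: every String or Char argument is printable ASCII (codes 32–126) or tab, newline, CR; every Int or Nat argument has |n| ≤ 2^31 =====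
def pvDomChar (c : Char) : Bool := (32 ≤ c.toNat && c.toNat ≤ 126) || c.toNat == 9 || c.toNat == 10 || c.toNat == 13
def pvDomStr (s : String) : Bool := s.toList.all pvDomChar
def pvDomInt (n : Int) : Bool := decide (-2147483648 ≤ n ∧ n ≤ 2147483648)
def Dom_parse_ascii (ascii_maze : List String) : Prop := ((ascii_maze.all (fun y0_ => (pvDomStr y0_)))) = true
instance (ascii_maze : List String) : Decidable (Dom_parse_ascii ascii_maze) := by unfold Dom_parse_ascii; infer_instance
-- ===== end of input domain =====

-- B replaces A's single nested loop (grid built and start/goal overwritten in one pass)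
-- by a per-character map for the grid plus two reversed scans for start/goal (objective: alternative).

-- ===== PORT A =====
-- state: (grid, start, goal); one step of the inner character loop of A
def pvStepCell (i : Int) (st : List Int × Option (Int × Int) × Option (Int × Int))
    (q : Int × Char) : List Int × Option (Int × Int) × Option (Int × Int) :=
  if q.2 = '#' then (st.1 ++ [1], st.2)
  else if q.2 = '.' ∨ q.2.toUpper = 'S' ∨ q.2.toUpper = 'G' then
    (st.1 ++ [0],
     (if q.2.toUpper = 'S' then some (i, q.1) else st.2.1),
     (if q.2.toUpper = 'S' then st.2.2
      else if q.2.toUpper = 'G' then some (i, q.1) else st.2.2))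
  else st  -- Python raises ValueError here; such inputs are excluded by Pre_parse_ascii

def pvStepRow (st : List (List Int) × Option (Int × Int) × Option (Int × Int))
    (p : Int × String) : List (List Int) × Option (Int × Int) × Option (Int × Int) :=
  let inner := (PySem.List.enumerate p.2.toList 0).foldl (pvStepCell p.1) ([], st.2)
  (st.1 ++ [inner.1], inner.2)

def parse_ascii (ascii_maze : List String) :
    List (List Int) × (Option (Int × Int)) × (Option (Int × Int)) :=
  (PySem.List.enumerate ascii_maze 0).foldl pvStepRow ([], none, none)

-- ===== PORT B =====
-- _cell of Source B (the raise branch is unreachable under Pre_parse_ascii)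
def pvCell (ch : Char) : Int :=
  if ch = '#' then 1
  else if ch = '.' ∨ ch.toUpper = 'S' ∨ ch.toUpper = 'G' then 0
  else 0

-- inner reversed loop of _last_pos over one row (list is the reversed enumeration)
def pvScanRowRev (i : Int) (l : List (Int × Char)) (target : Char) : Option (Int × Int) :=
  match l with
  | [] => none
  | (j, ch) :: rest => if ch.toUpper = target then some (i, j) else pvScanRowRev i rest target

-- outer reversed loop of _last_pos (rows is the reversed enumeration of the maze)
def pvLastPos (rows : List (Int × String)) (target : Char) : Option (Int × Int) :=
  match rows with
  | [] => none
  | (i, row) :: rest =>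
    match pvScanRowRev i (PySem.List.enumerate row.toList 0).reverse target with
    | some p => some p
    | none => pvLastPos rest target

def parse_ascii_alt (ascii_maze : List String) :
    List (List Int) × (Option (Int × Int)) × (Option (Int × Int)) :=
  (ascii_maze.map (fun row => row.toList.map pvCell),
   pvLastPos ((PySem.List.enumerate ascii_maze 0).reverse) 'S',
   pvLastPos ((PySem.List.enumerate ascii_maze 0).reverse) 'G')

-- ===== PRECONDITION & SPEC =====
-- Pre_ excludes exactly the inputs containing a character other than # . S G s g, on which A raises ValueError.
def Pre_parse_ascii (ascii_maze : List String) : Prop :=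
  (ascii_maze.all (fun row => row.toList.all
    (fun ch => ch == '#' || ch == '.' || ch == 'S' || ch == 's' || ch == 'G' || ch == 'g'))) = true
instance (ascii_maze : List String) : Decidable (Pre_parse_ascii ascii_maze) := by
  unfold Pre_parse_ascii; infer_instance

def pvWitness_parse_ascii : List String := ["#.S", ".G#", "sg."]

def Spec_parse_ascii (ascii_maze : List String) (out : List (List Int) × (Option (Int × Int)) × (Option (Int × Int))) : Prop := out = parse_ascii_alt ascii_maze
instance (ascii_maze : List String) (out : List (List Int) × (Option (Int × Int)) × (Option (Int × Int))) : Decidable (Spec_parse_ascii ascii_maze out) := by unfold Spec_parse_ascii; infer_instance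

-- ===== CLAIM (what is proved, stated in full; the proofs are below) =====
def Claim_equal_parse_ascii : Prop := ∀ (ascii_maze : List String), Dom_parse_ascii ascii_maze → Pre_parse_ascii ascii_maze → Spec_parse_ascii ascii_maze (parse_ascii ascii_maze)

-- ===== LEMMAS AND PROOFS =====

theorem pre_valid (m : List String) (h : Pre_parse_ascii m) : ∀ row ∈ m, ∀ ch ∈ row.toList,
    ch = '#' ∨ ch = '.' ∨ ch.toUpper = 'S' ∨ ch.toUpper = 'G' := by
  unfold Pre_parse_ascii at h
  simp only [List.all_eq_true, Bool.or_eq_true, beq_iff_eq] at h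
  intro row hr ch hc
  rcases h row hr ch hc with ((((h | h) | h) | h) | h) | h <;> subst h <;> decide

theorem pvScanRowRev_append (i : Int) (xs ys : List (Int × Char)) (t : Char) :
    pvScanRowRev i (xs ++ ys) t = (pvScanRowRev i xs t).or (pvScanRowRev i ys t) := by
  induction xs with
  | nil => simp [pvScanRowRev]
  | cons q rest ih =>
    obtain ⟨j, ch⟩ := q
    simp only [List.cons_append, pvScanRowRev, ih]
    split <;> simp

theorem pvLastPos_append (xs ys : List (Int × String)) (t : Char) :
    pvLastPos (xs ++ ys) t = (pvLastPos xs t).or (pvLastPos ys t) := by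
  induction xs with
  | nil => simp [pvLastPos]
  | cons p rest ih =>
    obtain ⟨i, row⟩ := p
    simp only [List.cons_append, pvLastPos, ih]
    cases pvScanRowRev i (PySem.List.enumerate row.toList 0).reverse t <;> simp

theorem inner_fold_eq (i : Int) (l : List (Int × Char))
    (hv : ∀ q ∈ l, q.2 = '#' ∨ q.2 = '.' ∨ q.2.toUpper = 'S' ∨ q.2.toUpper = 'G')
    (gr : List Int) (s g : Option (Int × Int)) :
    l.foldl (pvStepCell i) (gr, s, g) =
      (gr ++ l.map (fun q => pvCell q.2),
       (pvScanRowRev i l.reverse 'S').or s,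
       (pvScanRowRev i l.reverse 'G').or g) := by
  induction l generalizing gr s g with
  | nil => simp [pvScanRowRev]
  | cons q rest ih =>
    obtain ⟨j, ch⟩ := q
    have hch : ch = '#' ∨ ch = '.' ∨ ch.toUpper = 'S' ∨ ch.toUpper = 'G' :=
      hv (j, ch) (List.mem_cons_self ..)
    have hrest : ∀ q ∈ rest, q.2 = '#' ∨ q.2 = '.' ∨ q.2.toUpper = 'S' ∨ q.2.toUpper = 'G' :=
      fun q hq => hv q (List.mem_cons_of_mem _ hq)
    simp only [List.foldl_cons, List.reverse_cons, pvScanRowRev_append]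
    rcases hch with h | h
    · -- ch = '#'
      subst h
      rw [show pvStepCell i (gr, s, g) (j, '#') = (gr ++ [1], s, g) by simp [pvStepCell]]
      rw [ih hrest]
      simp [pvScanRowRev, pvCell]
    · have hfree : ch ≠ '#' := by
        rcases h with h | h | h
        · subst h; decide
        · intro hc; rw [hc] at h; revert h; decide
        · intro hc; rw [hc] at h; revert h; decide
      rw [show pvStepCell i (gr, s, g) (j, ch) =
            (gr ++ [0],
             (if ch.toUpper = 'S' then some (i, j) else s),
             (if ch.toUpper = 'S' then g
              else if ch.toUpper = 'G' then some (i, j) else g)) by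
        simp [pvStepCell, hfree, h]]
      rw [ih hrest]
      have hcell : pvCell ch = 0 := by simp [pvCell, hfree, h]
      by_cases hS : ch.toUpper = 'S'
      · simp [pvScanRowRev, hS, hcell]
      · by_cases hG : ch.toUpper = 'G'
        · simp [pvScanRowRev, hG, hcell]
        · simp [pvScanRowRev, hS, hG, hcell]

theorem map_snd_enumerate_map {α β : Type} (f : α → β) (l : List α) :
    (PySem.List.enumerate l).map (fun q => f q.2) = l.map f := by
  conv_rhs => rw [← PySem.List.map_snd_enumerate (xs := l) (s := 0)]
  rw [List.map_map]; rfl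

theorem snd_mem_of_mem_enumerate {α : Type} {xs : List α} {s : Int} {q : Int × α}
    (h : q ∈ PySem.List.enumerate xs s) : q.2 ∈ xs := by
  have : q.2 ∈ (PySem.List.enumerate xs s).map (·.2) := List.mem_map_of_mem h
  rwa [PySem.List.map_snd_enumerate] at this

theorem outer_fold_eq (rows : List (Int × String))
    (hv : ∀ p ∈ rows, ∀ ch ∈ p.2.toList,
      ch = '#' ∨ ch = '.' ∨ ch.toUpper = 'S' ∨ ch.toUpper = 'G')
    (gr : List (List Int)) (s g : Option (Int × Int)) :
    rows.foldl pvStepRow (gr, s, g) =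
      (gr ++ rows.map (fun p => p.2.toList.map pvCell),
       (pvLastPos rows.reverse 'S').or s,
       (pvLastPos rows.reverse 'G').or g) := by
  induction rows generalizing gr s g with
  | nil => simp [pvLastPos]
  | cons p rest ih =>
    obtain ⟨i, row⟩ := p
    have hrow := hv (i, row) (List.mem_cons_self ..)
    have hrest : ∀ p ∈ rest, ∀ ch ∈ p.2.toList,
        ch = '#' ∨ ch = '.' ∨ ch.toUpper = 'S' ∨ ch.toUpper = 'G' :=
      fun p hp => hv p (List.mem_cons_of_mem _ hp)
    have henum : ∀ q ∈ PySem.List.enumerate row.toList 0,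
        q.2 = '#' ∨ q.2 = '.' ∨ q.2.toUpper = 'S' ∨ q.2.toUpper = 'G' :=
      fun q hq => hrow q.2 (snd_mem_of_mem_enumerate hq)
    simp only [List.foldl_cons]
    rw [show pvStepRow (gr, s, g) (i, row) =
          (gr ++ [row.toList.map pvCell],
           (pvScanRowRev i (PySem.List.enumerate row.toList 0).reverse 'S').or s,
           (pvScanRowRev i (PySem.List.enumerate row.toList 0).reverse 'G').or g) by
      simp only [pvStepRow, inner_fold_eq i _ henum]
      rw [map_snd_enumerate_map, List.nil_append]]
    rw [ih hrest]
    have h1 : ∀ t, pvLastPos [(i, row)] t =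
        pvScanRowRev i (PySem.List.enumerate row.toList 0).reverse t := by
      intro t
      simp only [pvLastPos]
      cases pvScanRowRev i (PySem.List.enumerate row.toList 0).reverse t <;> rfl
    simp only [List.reverse_cons, pvLastPos_append, h1, Option.or_assoc, List.map_cons]
    simp

-- ===== VERDICT (by name: the statement is the Claim_ definition above) =====
theorem parse_ascii_spec : Claim_equal_parse_ascii := by
  intro maze _hdom hpre
  unfold Spec_parse_ascii parse_ascii parse_ascii_alt
  have hpre' := pre_valid maze hpre
  have hv : ∀ p ∈ PySem.List.enumerate maze, ∀ ch ∈ p.2.toList,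
      ch = '#' ∨ ch = '.' ∨ ch.toUpper = 'S' ∨ ch.toUpper = 'G' :=
    fun p hp => hpre' p.2 (snd_mem_of_mem_enumerate hp)
  rw [outer_fold_eq _ hv]
  simp only [List.nil_append, Option.or_none]
  rw [map_snd_enumerate_map (fun row : String => row.toList.map pvCell) maze]
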